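-- pv_equiv track=rewrite | github.com/Bhargav072007/SmartEvent | smartvenue_camera_router.py | section_to_gate
-- ===== SOURCE A (Python) =====
-- def section_to_gate(seat_section: str | None) -> str:
--     if not seat_section:
--         return "C"
--     digits = "".join(char for char in str(seat_section) if char.isdigit())
--     if not digits:
--         return "C"
--     section_num = int(digits)
--     if section_num < 20:
--         return "A"
--     if section_num < 40:
--         return "B"
--     if section_num < 60:
--         return "C"
--     if section_num < 80:
--         return "D"
--     if section_num < 100:
--         return "E"
--     return "F"
-- ===== SOURCE B (Python) =====
-- def section_to_gate(seat_section):
--     if not seat_section: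
--         return "C"
--     n = None
--     for ch in str(seat_section):
--         if ch.isdigit():
--             n = min((0 if n is None else n) * 10 + int(ch), 100)
--     if n is None:
--         return "C"
--     return "ABCDEF"[n // 20]
-- ===== Notes on version B (the rewrite author's own statement) =====
-- stated objective: alternative
-- what changed: B replaces A's staged pipeline (filter digits into a new string, int-parse that whole number, five-way threshold cascade) with a single pass keeping a saturating accumulator n = min(n*10 + digit, 100) and a final table lookup by n // 20; saturation is correct because every value >= 100 yields the last gate.
import Mathlib
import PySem

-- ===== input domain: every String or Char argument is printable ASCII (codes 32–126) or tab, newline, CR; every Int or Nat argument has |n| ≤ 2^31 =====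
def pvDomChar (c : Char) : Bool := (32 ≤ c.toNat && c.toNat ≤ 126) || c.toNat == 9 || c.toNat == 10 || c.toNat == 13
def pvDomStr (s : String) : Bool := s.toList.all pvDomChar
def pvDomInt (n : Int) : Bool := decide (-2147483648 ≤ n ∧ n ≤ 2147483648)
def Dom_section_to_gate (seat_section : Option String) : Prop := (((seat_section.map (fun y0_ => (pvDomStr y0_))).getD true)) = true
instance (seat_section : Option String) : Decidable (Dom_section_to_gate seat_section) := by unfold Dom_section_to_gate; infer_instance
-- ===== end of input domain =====

-- B replaces A's filter/join + int-parse + threshold cascade with one pass over the characters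
-- keeping a saturating accumulator min(n*10+digit, 100), then a table lookup (objective: alternative).


-- ===== PORT A =====
-- 'not seat_section' is true exactly for None and "".
-- int(digits): at this point digits is a NONEMPTY list of ASCII digit characters only
-- (the filter removed everything else), and on such strings int() is exactly the
-- positional base-10 value; it is ported by hand as this left fold (exact there).
def pvDigitsVal (cs : List Char) : Nat :=
  cs.foldl (fun a c => a * 10 + (c.toNat - 48)) 0

def section_to_gate (seat_section : Option String) : String :=
  match seat_section with
  | none => "C"
  | some s =>
    if s.toList.isEmpty then "C" else
    let digits := s.toList.filter (fun c => PySem.Chars.isdigit c)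
    if digits.isEmpty then "C" else
    let section_num : Int := (pvDigitsVal digits : Int)
    if section_num < 20 then "A"
    else if section_num < 40 then "B"
    else if section_num < 60 then "C"
    else if section_num < 80 then "D"
    else if section_num < 100 then "E"
    else "F"

-- ===== PORT B =====
-- one step of B's loop: n = min((0 if n is None else n)*10 + int(ch), 100) on digits,
-- unchanged otherwise; int(ch) for an ASCII digit ch is ch.toNat - 48 (exact there).
def pvSatStep (n : Option Nat) (c : Char) : Option Nat :=
  if PySem.Chars.isdigit c then some (min ((n.getD 0) * 10 + (c.toNat - 48)) 100) else n

-- "ABCDEF"[n // 20] is pyGet?; the getD "" default is unreachable (0 ≤ n ≤ 100).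
def section_to_gate_alt (seat_section : Option String) : String :=
  match seat_section with
  | none => "C"
  | some s =>
    if s.toList.isEmpty then "C" else
    match s.toList.foldl pvSatStep none with
    | none => "C"
    | some n =>
      ((PySem.Str.pyGet? "ABCDEF" (PySem.Int.floordiv (n : Int) 20)).map
        (fun c => String.ofList [c])).getD ""

-- ===== PRECONDITION & SPEC =====
def Spec_section_to_gate (seat_section : Option String) (out : String) : Prop := out = section_to_gate_alt seat_section
instance (seat_section : Option String) (out : String) : Decidable (Spec_section_to_gate seat_section out) := by unfold Spec_section_to_gate; infer_instance

-- ===== CLAIM =====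
def Claim_equal_section_to_gate : Prop := ∀ (seat_section : Option String), Dom_section_to_gate seat_section → Spec_section_to_gate seat_section (section_to_gate seat_section)

-- ===== LEMMAS AND PROOFS =====

-- B's fold skips non-digits, so it equals the fold over the digit filter
lemma fold_filter (l : List Char) (acc : Option Nat) :
    l.foldl pvSatStep acc = (l.filter (fun c => PySem.Chars.isdigit c)).foldl pvSatStep acc := by
  induction l generalizing acc with
  | nil => rfl
  | cons c t ih =>
    by_cases h : PySem.Chars.isdigit c = true
    · simp [List.filter, h, List.foldl, ih]
    · simp only [List.foldl, List.filter, h]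
      rw [show pvSatStep acc c = acc by simp [pvSatStep, h]]
      exact ih acc

-- saturation invariant: starting from min v 100, the fold computes min (true value) 100
lemma fold_sat (ds : List Char) (hds : ∀ c ∈ ds, PySem.Chars.isdigit c = true) (v : Nat) :
    ds.foldl pvSatStep (some (min v 100))
      = some (min (ds.foldl (fun a c => a * 10 + (c.toNat - 48)) v) 100) := by
  induction ds generalizing v with
  | nil => rfl
  | cons c t ih =>
    simp only [List.foldl]
    rw [show pvSatStep (some (min v 100)) c
          = some (min (v * 10 + (c.toNat - 48)) 100) by
        simp only [pvSatStep, hds c (by simp), if_true, Option.getD_some]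
        congr 1
        omega]
    exact ih (fun c hc => hds c (by simp [hc])) _

-- on a nonempty all-digit list, B's fold returns the saturated value of A's parse
lemma fold_digits (ds : List Char) (hds : ∀ c ∈ ds, PySem.Chars.isdigit c = true)
    (hne : ds ≠ []) :
    ds.foldl pvSatStep none = some (min (pvDigitsVal ds) 100) := by
  cases ds with
  | nil => exact absurd rfl hne
  | cons c t =>
    simp only [List.foldl, pvDigitsVal]
    rw [show pvSatStep none c = some (min (0 * 10 + (c.toNat - 48)) 100) by
        simp [pvSatStep, hds c (by simp)]]
    exact fold_sat t (fun c hc => hds c (by simp [hc])) _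

-- A's threshold cascade equals B's table lookup at the saturated value
lemma gate_table (v : Nat) :
    (if (v : Int) < 20 then "A" else if (v : Int) < 40 then "B"
     else if (v : Int) < 60 then "C" else if (v : Int) < 80 then "D"
     else if (v : Int) < 100 then "E" else "F")
    = ((PySem.Str.pyGet? "ABCDEF" (PySem.Int.floordiv ((min v 100 : Nat) : Int) 20)).map
        (fun c => String.ofList [c])).getD "" := by
  rw [PySem.Int.floordiv_eq_ediv_of_pos (by norm_num),
      show ((min v 100 : Nat) : Int) / 20 = ((min v 100 / 20 : Nat) : Int) from
        (Int.natCast_div _ _).symm]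
  split_ifs with h1 h2 h3 h4 h5
  · rw [show min v 100 / 20 = 0 by omega]; decide
  · rw [show min v 100 / 20 = 1 by omega]; decide
  · rw [show min v 100 / 20 = 2 by omega]; decide
  · rw [show min v 100 / 20 = 3 by omega]; decide
  · rw [show min v 100 / 20 = 4 by omega]; decide
  · rw [show min v 100 / 20 = 5 by omega]; decide

-- ===== VERDICT =====
theorem section_to_gate_spec : Claim_equal_section_to_gate := by
  intro seat_section _
  unfold Spec_section_to_gate section_to_gate section_to_gate_alt
  cases seat_section with
  | none => rfl
  | some s =>
    by_cases he : s.toList.isEmpty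
    · simp [he]
    · simp only [he, if_false, Bool.false_eq_true]
      rw [fold_filter s.toList none]
      by_cases hd : (s.toList.filter (fun c => PySem.Chars.isdigit c)).isEmpty
      · simp [List.isEmpty_iff.mp hd]
      · rw [fold_digits _ (fun c hc => (List.mem_filter.mp hc).2)
              (by simpa [List.isEmpty_iff] using hd)]
        simp only [hd, if_false, Bool.false_eq_true]
        exact gate_table _
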